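-- pv_equiv track=rewrite | github.com/Vetin/pipe | .agents/pipeline-core/scripts/featurectl_core/events.py | render_compact_event_summary
-- ===== SOURCE A (Python) =====
-- from typing import Any
--
-- def render_compact_event_summary(events: list[dict[str, Any]]) -> list[str]:
--     if not events:
--         return ["- No structured execution events were recorded."]
--
--     lines: list[str] = []
--     if any(event.get("event_type") == "run_initialized" for event in events):
--         lines.append("- Initialized the run.")
--
--     planning_gates = {"feature_contract", "architecture", "tech_design", "slicing_readiness"}
--     approved_planning = {
--         str(event.get("gate"))
--         for event in events
--         if event.get("event_type") == "gate_status_changed"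
--         and event.get("new_status") in {"approved", "delegated"}
--         and str(event.get("gate")) in planning_gates
--     }
--     if approved_planning == planning_gates:
--         lines.append("- Approved planning gates.")
--     elif approved_planning:
--         lines.append(f"- Approved planning gates: {format_backticked_list(sorted(approved_planning))}.")
--
--     completed_slices = sorted(
--         {
--             str(event.get("slice"))
--             for event in events
--             if event.get("event_type") in {"slice_completed", "slice_retry_completed"}
--             and event.get("slice")
--         }
--     )
--     if completed_slices:
--         lines.append(f"- Completed slices {format_slice_summary(completed_slices)}.")
--
--     delivery_gates = ("implementation", "review", "verification", "finish")
--     completed_delivery = [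
--         gate
--         for gate in delivery_gates
--         if any(
--             event.get("event_type") == "gate_status_changed"
--             and event.get("gate") == gate
--             and event.get("new_status") == "complete"
--             for event in events
--         )
--     ]
--     if completed_delivery:
--         lines.append(f"- Completed delivery gates: {format_backticked_list(completed_delivery)}.")
--
--     if any(event.get("event_type") == "review_completed" for event in events):
--         lines.append("- Completed review.")
--     if any(event.get("event_type") == "verification_completed" for event in events):
--         lines.append("- Completed verification.")
--
--     promotion_events = [event for event in events if event.get("event_type") == "feature_promoted"]
--     if promotion_events:
--         canonical_path = promotion_events[-1].get("canonical_path")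
--         lines.append(f"- Promoted canonical feature memory to `{canonical_path}`.")
--
--     archive_events = [event for event in events if event.get("event_type") == "incoming_variant_archived"]
--     if archive_events:
--         canonical_path = archive_events[-1].get("canonical_path")
--         lines.append(f"- Archived incoming variant for `{canonical_path}`.")
--
--     return lines or ["- Recorded structured execution events in `events.yaml`."]
--
-- def format_slice_summary(slice_ids: list[str]) -> str:
--     if len(slice_ids) == 1:
--         return f"`{slice_ids[0]}`"
--     return f"{format_backticked_list(slice_ids)}"
--
-- def format_backticked_list(values: list[str]) -> str:
--     quoted = [f"`{value}`" for value in values]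
--     if len(quoted) == 1:
--         return quoted[0]
--     if len(quoted) == 2:
--         return f"{quoted[0]} and {quoted[1]}"
--     return ", ".join(quoted[:-1]) + f", and {quoted[-1]}"
-- ===== SOURCE B (Python) =====
-- def render_compact_event_summary(events: list[dict]) -> list[str]:
--     if not events:
--         return ["- No structured execution events were recorded."]
--
--     planning = {"feature_contract", "architecture", "tech_design", "slicing_readiness"}
--     deliv_order = ("implementation", "review", "verification", "finish")
--
--     run_init = review_done = verif_done = prom = arch = False
--     approved: set[str] = set()
--     slices: set[str] = set()
--     deliv: set[str] = set()
--     prom_path = arch_path = None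
--     for e in events:
--         t = e.get("event_type")
--         if t == "run_initialized":
--             run_init = True
--         elif t == "gate_status_changed":
--             g, ns = e.get("gate"), e.get("new_status")
--             if ns in ("approved", "delegated") and str(g) in planning:
--                 approved.add(str(g))
--             if ns == "complete" and g in deliv_order:
--                 deliv.add(g)
--         elif t in ("slice_completed", "slice_retry_completed"):
--             if e.get("slice"):
--                 slices.add(str(e.get("slice")))
--         elif t == "review_completed":
--             review_done = True
--         elif t == "verification_completed":
--             verif_done = True
--         elif t == "feature_promoted":
--             prom, prom_path = True, e.get("canonical_path")
--         elif t == "incoming_variant_archived":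
--             arch, arch_path = True, e.get("canonical_path")
--
--     deliv_list = [g for g in deliv_order if g in deliv]
--     candidates = [
--         "- Initialized the run." if run_init else None,
--         "- Approved planning gates." if approved == planning
--         else (f"- Approved planning gates: {_oxford(sorted(approved))}." if approved else None),
--         f"- Completed slices {_oxford(sorted(slices))}." if slices else None,
--         f"- Completed delivery gates: {_oxford(deliv_list)}." if deliv_list else None,
--         "- Completed review." if review_done else None,
--         "- Completed verification." if verif_done else None,
--         f"- Promoted canonical feature memory to `{prom_path}`." if prom else None,
--         f"- Archived incoming variant for `{arch_path}`." if arch else None,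
--     ]
--     lines = [line for line in candidates if line is not None]
--     return lines or ["- Recorded structured execution events in `events.yaml`."]
--
--
-- def _oxford(values: list[str]) -> str:
--     # "`a`", "`a` and `b`", "`a`, `b`, and `c`" by structural recursion
--     match values:
--         case [a]:
--             return f"`{a}`"
--         case [a, b]:
--             return f"`{a}` and `{b}`"
--         case [a, *rest]:
--             return f"`{a}`, " + _oxford_tail(rest)
--     return ""
--
--
-- def _oxford_tail(values: list[str]) -> str:
--     match values:
--         case [b]:
--             return f"and `{b}`"
--         case [b, *rest]:
--             return f"`{b}`, " + _oxford_tail(rest)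
--     return ""
-- ===== Notes on version B (the rewrite author's own statement) =====
-- stated objective: simpler
-- what changed: A makes nine separate scans over the event list (any() generators, set comprehensions, a per-gate nested scan, two filtered-list passes) and formats lists by index/slice/join arithmetic; B does one accumulating pass over the events, renders a fixed list of optional candidate lines filtered at the end, and formats lists by structural recursion.
import Mathlib
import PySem

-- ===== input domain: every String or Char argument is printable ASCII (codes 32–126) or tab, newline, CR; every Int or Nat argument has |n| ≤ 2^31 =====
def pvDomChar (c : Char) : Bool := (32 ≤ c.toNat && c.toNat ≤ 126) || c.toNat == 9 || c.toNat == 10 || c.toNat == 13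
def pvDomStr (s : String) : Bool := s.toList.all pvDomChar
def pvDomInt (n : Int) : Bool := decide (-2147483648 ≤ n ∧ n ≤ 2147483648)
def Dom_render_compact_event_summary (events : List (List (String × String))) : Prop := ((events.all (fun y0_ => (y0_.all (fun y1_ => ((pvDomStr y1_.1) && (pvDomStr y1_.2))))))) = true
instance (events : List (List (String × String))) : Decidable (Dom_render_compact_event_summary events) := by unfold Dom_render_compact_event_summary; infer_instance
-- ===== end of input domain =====

-- B replaces A's nine separate scans by ONE accumulating pass, renders the lines as a fixed list of
-- optional candidates filtered at the end, and formats lists by structural recursion instead of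
-- A's index/slice/join arithmetic (objective: simpler one-pass decomposition).

-- shared helpers (ports of dict.get and str()/truthiness on an Optional value)
def pvGet (e : List (String × String)) (k : String) : Option String := (PySem.Dict.mk e).get? k
def pvStrOpt (o : Option String) : String := match o with | some s => s | none => "None"
def pvTruthy (o : Option String) : Bool := match o with | some s => !(s == "") | none => false

-- ===== PORT A =====
-- format_backticked_list; quoted[0]/[1]/[-1] via pyGetD (callers in this file always pass the index in range)
def format_backticked_list (values : List String) : String :=
  let quoted := values.map (fun value => "`" ++ value ++ "`")
  if quoted.length = 1 then PySem.List.pyGetD quoted 0 ""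
  else if quoted.length = 2 then PySem.List.pyGetD quoted 0 "" ++ " and " ++ PySem.List.pyGetD quoted 1 ""
  else PySem.Str.join ", " (PySem.List.slice quoted none (some (-1))) ++ ", and " ++ PySem.List.pyGetD quoted (-1) ""

def format_slice_summary (slice_ids : List String) : String :=
  if slice_ids.length = 1 then "`" ++ PySem.List.pyGetD slice_ids 0 "" ++ "`"
  else format_backticked_list slice_ids

def render_compact_event_summary (events : List (List (String × String))) : List String :=
  if events = [] then ["- No structured execution events were recorded."]
  else
    let lines : List String := []
    let lines := lines ++ (if events.any (fun e => pvGet e "event_type" == some "run_initialized")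
      then ["- Initialized the run."] else [])
    let planning_gates : PySem.Set String :=
      PySem.Set.ofList ["feature_contract", "architecture", "tech_design", "slicing_readiness"]
    let approved_planning : PySem.Set String := PySem.Set.ofList
      ((events.filter (fun e =>
          pvGet e "event_type" == some "gate_status_changed" &&
          (pvGet e "new_status" == some "approved" || pvGet e "new_status" == some "delegated") &&
          PySem.Set.contains planning_gates (pvStrOpt (pvGet e "gate")))).map
        (fun e => pvStrOpt (pvGet e "gate")))
    let lines := lines ++
      (if PySem.Set.equal approved_planning planning_gates then
        ["- Approved planning gates."]
      else if !approved_planning.isEmpty then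
        ["- Approved planning gates: " ++
          format_backticked_list (PySem.List.sorted approved_planning (fun x => x) false) ++ "."]
      else [])
    let completed_slices := PySem.List.sorted
      (PySem.Set.ofList ((events.filter (fun e =>
          (pvGet e "event_type" == some "slice_completed" ||
           pvGet e "event_type" == some "slice_retry_completed") &&
          pvTruthy (pvGet e "slice"))).map (fun e => pvStrOpt (pvGet e "slice"))))
      (fun x => x) false
    let lines := lines ++ (if !completed_slices.isEmpty then
        ["- Completed slices " ++ format_slice_summary completed_slices ++ "."]
      else [])
    let delivery_gates : List String := ["implementation", "review", "verification", "finish"]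
    let completed_delivery := delivery_gates.filter (fun gate => events.any (fun e =>
        pvGet e "event_type" == some "gate_status_changed" &&
        pvGet e "gate" == some gate &&
        pvGet e "new_status" == some "complete"))
    let lines := lines ++ (if !completed_delivery.isEmpty then
        ["- Completed delivery gates: " ++ format_backticked_list completed_delivery ++ "."]
      else [])
    let lines := lines ++ (if events.any (fun e => pvGet e "event_type" == some "review_completed")
      then ["- Completed review."] else [])
    let lines := lines ++ (if events.any (fun e => pvGet e "event_type" == some "verification_completed")
      then ["- Completed verification."] else [])
    let promotion_events := events.filter (fun e => pvGet e "event_type" == some "feature_promoted")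
    let lines := lines ++ (match promotion_events.getLast? with
      | some ev => ["- Promoted canonical feature memory to `" ++
          pvStrOpt (pvGet ev "canonical_path") ++ "`."]
      | none => [])
    let archive_events := events.filter (fun e => pvGet e "event_type" == some "incoming_variant_archived")
    let lines := lines ++ (match archive_events.getLast? with
      | some ev => ["- Archived incoming variant for `" ++
          pvStrOpt (pvGet ev "canonical_path") ++ "`."]
      | none => [])
    if lines.isEmpty then ["- Recorded structured execution events in `events.yaml`."] else lines

-- ===== PORT B =====
def oxTail : List String → String
  | [] => ""
  | [b] => "and `" ++ b ++ "`"
  | b :: rest => "`" ++ b ++ "`, " ++ oxTail rest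

def oxford : List String → String
  | [] => ""
  | [a] => "`" ++ a ++ "`"
  | [a, b] => "`" ++ a ++ "` and `" ++ b ++ "`"
  | a :: rest => "`" ++ a ++ "`, " ++ oxTail rest

structure PvSt where
  runInit : Bool
  reviewDone : Bool
  verifDone : Bool
  approved : PySem.Set String
  slices : PySem.Set String
  delivery : PySem.Set String
  promoted : Bool
  promotedPath : Option String
  archived : Bool
  archivedPath : Option String
deriving Repr, DecidableEq

def pvStep (planning : PySem.Set String) (deliveryGates : List String)
    (s : PvSt) (e : List (String × String)) : PvSt :=
  let et := pvGet e "event_type"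
  if et == some "run_initialized" then { s with runInit := true }
  else if et == some "gate_status_changed" then
    let gate := pvGet e "gate"
    let status := pvGet e "new_status"
    let s := if (status == some "approved" || status == some "delegated") &&
                PySem.Set.contains planning (pvStrOpt gate)
             then { s with approved := PySem.Set.add s.approved (pvStrOpt gate) } else s
    match gate with
    | some g => if status == some "complete" && deliveryGates.contains g
                then { s with delivery := PySem.Set.add s.delivery g } else s
    | none => s
  else if et == some "slice_completed" || et == some "slice_retry_completed" then
    if pvTruthy (pvGet e "slice")
    then { s with slices := PySem.Set.add s.slices (pvStrOpt (pvGet e "slice")) } else s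
  else if et == some "review_completed" then { s with reviewDone := true }
  else if et == some "verification_completed" then { s with verifDone := true }
  else if et == some "feature_promoted" then
    { s with promoted := true, promotedPath := pvGet e "canonical_path" }
  else if et == some "incoming_variant_archived" then
    { s with archived := true, archivedPath := pvGet e "canonical_path" }
  else s

def render_compact_event_summary_alt (events : List (List (String × String))) : List String :=
  match events with
  | [] => ["- No structured execution events were recorded."]
  | _ =>
    let planning : PySem.Set String :=
      PySem.Set.ofList ["feature_contract", "architecture", "tech_design", "slicing_readiness"]
    let deliv_order : List String := ["implementation", "review", "verification", "finish"]
    let st := events.foldl (pvStep planning deliv_order)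
      ⟨false, false, false, PySem.Set.empty, PySem.Set.empty, PySem.Set.empty, false, none, false, none⟩
    let deliv_list := deliv_order.filter (fun g => PySem.Set.contains st.delivery g)
    let candidates : List (Option String) :=
      [ if st.runInit then some "- Initialized the run." else none,
        if PySem.Set.equal st.approved planning then some "- Approved planning gates."
        else if !st.approved.isEmpty then
          some ("- Approved planning gates: " ++
            oxford (PySem.List.sorted st.approved (fun x => x) false) ++ ".")
        else none,
        if !st.slices.isEmpty then
          some ("- Completed slices " ++
            oxford (PySem.List.sorted st.slices (fun x => x) false) ++ ".")
        else none,
        if !deliv_list.isEmpty then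
          some ("- Completed delivery gates: " ++ oxford deliv_list ++ ".")
        else none,
        if st.reviewDone then some "- Completed review." else none,
        if st.verifDone then some "- Completed verification." else none,
        if st.promoted then
          some ("- Promoted canonical feature memory to `" ++ pvStrOpt st.promotedPath ++ "`.")
        else none,
        if st.archived then
          some ("- Archived incoming variant for `" ++ pvStrOpt st.archivedPath ++ "`.")
        else none ]
    let lines := candidates.filterMap id
    if lines.isEmpty then ["- Recorded structured execution events in `events.yaml`."] else lines

-- ===== PRECONDITION & SPEC =====
def Spec_render_compact_event_summary (events : List (List (String × String))) (out : List String) : Prop := out = render_compact_event_summary_alt events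
instance (events : List (List (String × String))) (out : List String) : Decidable (Spec_render_compact_event_summary events out) := by unfold Spec_render_compact_event_summary; infer_instance

-- ===== CLAIM (what is proved, stated in full; the proofs are below) =====
def Claim_equal_render_compact_event_summary : Prop := ∀ (events : List (List (String × String))), Dom_render_compact_event_summary events → Spec_render_compact_event_summary events (render_compact_event_summary events)

-- ===== LEMMAS AND PROOFS =====

-- the predicates/extractors of A's scans, named for the loop invariant
def pvPG : PySem.Set String := PySem.Set.ofList ["feature_contract", "architecture", "tech_design", "slicing_readiness"]
def pvDG : List String := ["implementation", "review", "verification", "finish"]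
def pInit (e : List (String × String)) : Bool := pvGet e "event_type" == some "run_initialized"
def pRev (e : List (String × String)) : Bool := pvGet e "event_type" == some "review_completed"
def pVer (e : List (String × String)) : Bool := pvGet e "event_type" == some "verification_completed"
def pProm (e : List (String × String)) : Bool := pvGet e "event_type" == some "feature_promoted"
def pArch (e : List (String × String)) : Bool := pvGet e "event_type" == some "incoming_variant_archived"
def pApp (e : List (String × String)) : Bool :=
  pvGet e "event_type" == some "gate_status_changed" &&
  (pvGet e "new_status" == some "approved" || pvGet e "new_status" == some "delegated") &&
  PySem.Set.contains pvPG (pvStrOpt (pvGet e "gate"))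
def pSlc (e : List (String × String)) : Bool :=
  (pvGet e "event_type" == some "slice_completed" ||
   pvGet e "event_type" == some "slice_retry_completed") && pvTruthy (pvGet e "slice")
def fGate (e : List (String × String)) : String := pvStrOpt (pvGet e "gate")
def fSlc (e : List (String × String)) : String := pvStrOpt (pvGet e "slice")
def fDel (e : List (String × String)) : Option String :=
  match pvGet e "gate" with
  | some g => if (pvGet e "event_type" == some "gate_status_changed") &&
                 (pvGet e "new_status" == some "complete") && pvDG.contains g
              then some g else none
  | none => none

theorem pv_step_spec (s : PvSt) (e : List (String × String)) :
    pvStep pvPG pvDG s e =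
      { runInit := s.runInit || pInit e
        reviewDone := s.reviewDone || pRev e
        verifDone := s.verifDone || pVer e
        approved := if pApp e then PySem.Set.add s.approved (fGate e) else s.approved
        slices := if pSlc e then PySem.Set.add s.slices (fSlc e) else s.slices
        delivery := match fDel e with
          | some g => PySem.Set.add s.delivery g
          | none => s.delivery
        promoted := s.promoted || pProm e
        promotedPath := if pProm e then pvGet e "canonical_path" else s.promotedPath
        archived := s.archived || pArch e
        archivedPath := if pArch e then pvGet e "canonical_path" else s.archivedPath } := by
  simp only [pvStep]
  by_cases h1 : pvGet e "event_type" = some "run_initialized"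
  · simp [pInit, pRev, pVer, pProm, pArch, pApp, pSlc, fDel, h1]
    cases pvGet e "gate" <;> simp
  by_cases h2 : pvGet e "event_type" = some "gate_status_changed"
  · simp only [pInit, pRev, pVer, pProm, pArch, pApp, pSlc, fGate, fSlc, fDel, h1, h2]
    cases hg : pvGet e "gate" with
    | none =>
      simp [h2, hg]
      split_ifs <;> (cases s <;> rfl)
    | some g =>
      simp [h2, hg]
      split_ifs <;> (cases s <;> rfl)
  by_cases h3 : (pvGet e "event_type" = some "slice_completed" ∨ pvGet e "event_type" = some "slice_retry_completed")
  · have h3' : (pvGet e "event_type" == some "slice_completed" || pvGet e "event_type" == some "slice_retry_completed") = true := by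
      rcases h3 with h | h <;> simp [h]
    by_cases hsl : pvTruthy (pvGet e "slice") = true <;>
    · rcases h3 with h | h <;>
      · simp [pInit, pRev, pVer, pProm, pArch, pApp, pSlc, fSlc, fDel, h, hsl]
        cases pvGet e "gate" <;> simp [h]
  have h3' : (pvGet e "event_type" == some "slice_completed" || pvGet e "event_type" == some "slice_retry_completed") = false := by
    push_neg at h3
    simp [h3.1, h3.2]
  by_cases h4 : pvGet e "event_type" = some "review_completed"
  · simp [pInit, pRev, pVer, pProm, pArch, pApp, pSlc, fDel, h4]
    cases pvGet e "gate" <;> simp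
  by_cases h5 : pvGet e "event_type" = some "verification_completed"
  · simp [pInit, pRev, pVer, pProm, pArch, pApp, pSlc, fDel, h5]
    cases pvGet e "gate" <;> simp
  by_cases h6 : pvGet e "event_type" = some "feature_promoted"
  · simp [pInit, pRev, pVer, pProm, pArch, pApp, pSlc, fDel, h6]
    cases pvGet e "gate" <;> simp
  by_cases h7 : pvGet e "event_type" = some "incoming_variant_archived"
  · simp [pInit, pRev, pVer, pProm, pArch, pApp, pSlc, fDel, h7]
    cases pvGet e "gate" <;> simp
  · have b1 := beq_eq_false_iff_ne.mpr h1
    have b4 := beq_eq_false_iff_ne.mpr h4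
    have b5 := beq_eq_false_iff_ne.mpr h5
    have b6 := beq_eq_false_iff_ne.mpr h6
    have b7 := beq_eq_false_iff_ne.mpr h7
    simp [pInit, pRev, pVer, pProm, pArch, pApp, pSlc, fDel, b1, h2, h3', b4, b5, b6, b7]
    cases pvGet e "gate" <;> simp

theorem pv_update_cons (s : PySem.Set String) (x : String) (xs : List String) :
    PySem.Set.update s (x :: xs) = PySem.Set.update (PySem.Set.add s x) xs := rfl

theorem pv_loop_spec (l : List (List (String × String))) (s : PvSt) :
    l.foldl (pvStep pvPG pvDG) s =
      { runInit := s.runInit || l.any pInit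
        reviewDone := s.reviewDone || l.any pRev
        verifDone := s.verifDone || l.any pVer
        approved := PySem.Set.update s.approved ((l.filter pApp).map fGate)
        slices := PySem.Set.update s.slices ((l.filter pSlc).map fSlc)
        delivery := PySem.Set.update s.delivery (l.filterMap fDel)
        promoted := s.promoted || l.any pProm
        promotedPath := l.foldl (fun acc e => if pProm e then pvGet e "canonical_path" else acc) s.promotedPath
        archived := s.archived || l.any pArch
        archivedPath := l.foldl (fun acc e => if pArch e then pvGet e "canonical_path" else acc) s.archivedPath } := by
  induction l generalizing s with
  | nil => cases s; simp [PySem.Set.update]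
  | cons e l ih =>
    rw [List.foldl_cons, pv_step_spec, ih]
    by_cases ha : pApp e = true <;> by_cases hs2 : pSlc e = true <;>
      by_cases hp : pProm e = true <;> by_cases hr : pArch e = true <;>
      cases hd : fDel e <;>
      simp [ha, hs2, hp, hr, hd, List.any_cons, List.filter_cons, List.filterMap_cons,
        Bool.or_assoc, pv_update_cons]

theorem pv_foldl_last {α : Type} (p : List (String × String) → Bool)
    (f : List (String × String) → α) (l : List (List (String × String))) (init : α) :
    l.foldl (fun acc e => if p e then f e else acc) init =
      (match (l.filter p).getLast? with | none => init | some e => f e) := by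
  induction l generalizing init with
  | nil => rfl
  | cons e l ih =>
    rw [List.foldl_cons, ih]
    by_cases h : p e = true
    · rw [if_pos h, List.filter_cons_of_pos h]
      cases hl : l.filter p with
      | nil => simp
      | cons a t =>
        rw [List.getLast?_cons_cons]
        cases h2 : (a :: t).getLast? with
        | none => exact absurd (List.getLast?_eq_none_iff.mp h2) (by simp)
        | some b => rfl
    · rw [if_neg h, List.filter_cons_of_neg (by simpa using h)]

theorem pv_fDel_eq (e : List (String × String)) (g : String) (hg : g ∈ pvDG) :
    (fDel e = some g) ↔
      ((pvGet e "event_type" == some "gate_status_changed" &&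
        pvGet e "gate" == some g &&
        pvGet e "new_status" == some "complete") = true) := by
  unfold fDel
  cases hge : pvGet e "gate" with
  | none => simp [hge]
  | some g' =>
    by_cases h1 : pvGet e "event_type" = some "gate_status_changed" <;>
      by_cases h2 : pvGet e "new_status" = some "complete" <;>
      by_cases h3 : g' ∈ pvDG <;>
      by_cases h4 : g' = g <;>
      simp_all [List.contains_eq_mem]

theorem pv_deliv_mem (events : List (List (String × String))) (g : String) (hg : g ∈ pvDG) :
    PySem.Set.contains (PySem.Set.ofList (events.filterMap fDel)) g =
      events.any (fun e =>
        pvGet e "event_type" == some "gate_status_changed" &&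
        pvGet e "gate" == some g &&
        pvGet e "new_status" == some "complete") := by
  rw [Bool.eq_iff_iff]
  simp only [PySem.Set.contains, List.contains_eq_mem, List.elem_iff, decide_eq_true_eq,
    PySem.Set.mem_ofList, List.any_eq_true]
  constructor
  · intro hmem
    rcases List.mem_filterMap.mp hmem with ⟨e, he, hf⟩
    exact ⟨e, he, (pv_fDel_eq e g hg).mp hf⟩
  · rintro ⟨e, he, hp⟩
    exact List.mem_filterMap.mpr ⟨e, he, (pv_fDel_eq e g hg).mpr hp⟩

theorem pv_update_empty (xs : List String) :
    PySem.Set.update PySem.Set.empty xs = PySem.Set.ofList xs := rfl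

theorem pv_sorted_isEmpty (xs : List String) :
    (PySem.List.sorted xs (fun x => x) false).isEmpty = xs.isEmpty := by
  rw [Bool.eq_iff_iff]
  simp [List.isEmpty_iff, PySem.List.sorted_eq_nil_iff]

-- oxford agrees with A's format_backticked_list on every nonempty list
def pvBt (v : String) : String := "`" ++ v ++ "`"

theorem pv_getD_getLast? (x a b : String) (l : List String) :
    ((x::l).getLast?.getD a) = ((x::l).getLast?.getD b) := by
  cases h : (x::l).getLast? with
  | none => exact absurd (List.getLast?_eq_none_iff.mp h) (by simp)
  | some y => simp

theorem pv_oxTail_eq (b c : String) (t : List String) :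
    (oxTail (b::c::t)).toList
      = (PySem.Str.join ", " (((b::c::t).map pvBt).dropLast)).toList
        ++ (", and ").toList ++ (((b::c::t).map pvBt).getLastD "").toList := by
  induction t generalizing b c with
  | nil => simp [oxTail, pvBt, PySem.Str.join]
  | cons d t ih =>
    rw [show oxTail (b::c::d::t) = "`" ++ b ++ "`, " ++ oxTail (c::d::t) from rfl]
    rw [List.map_cons, List.map_cons, List.dropLast_cons₂]
    have hj : PySem.Str.join ", " (pvBt b :: (pvBt c :: (d::t).map pvBt).dropLast)
        = pvBt b ++ ", " ++ PySem.Str.join ", " ((pvBt c :: (d::t).map pvBt).dropLast) := by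
      cases ht : ((d::t).map pvBt) with
      | nil => simp at ht
      | cons x xs =>
        rw [List.dropLast_cons₂]
        apply String.toList_inj.mp
        simp [PySem.Str.toList_join, PySem.Chars.join_cons_cons]
    rw [hj]
    have ihc := ih c d
    rw [List.map_cons, List.map_cons] at ihc
    simp only [List.getLastD_cons]
    simp [ihc, pvBt]
    exact congrArg String.toList (pv_getD_getLast? _ _ _ _)

theorem pv_oxford_eq (xs : List String) (h : xs ≠ []) :
    oxford xs = format_backticked_list xs := by
  match xs with
  | [a] =>
    simp [oxford, format_backticked_list, PySem.List.pyGetD, PySem.List.pyGet?, PySem.List.pyIdx?]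
  | [a, b] =>
    apply String.toList_inj.mp
    simp [oxford, format_backticked_list, PySem.List.pyGetD, PySem.List.pyGet?, PySem.List.pyIdx?]
  | a :: b :: c :: t =>
    rw [show oxford (a::b::c::t) = "`" ++ a ++ "`, " ++ oxTail (b::c::t) from rfl]
    unfold format_backticked_list
    rw [show (fun value => "`" ++ value ++ "`") = pvBt from rfl]
    simp only [List.map_cons, List.length_cons, PySem.List.slice_to_neg_one,
      List.dropLast_cons₂]
    rw [if_neg (by omega), if_neg (by omega)]
    rw [PySem.List.pyGetD_neg_one]
    case h => simp
    have hj : PySem.Str.join ", " (pvBt a :: (pvBt b :: (pvBt c :: t.map pvBt).dropLast))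
        = pvBt a ++ ", " ++ PySem.Str.join ", " (pvBt b :: (pvBt c :: t.map pvBt).dropLast) := by
      apply String.toList_inj.mp
      simp [PySem.Str.toList_join, PySem.Chars.join_cons_cons]
    apply String.toList_inj.mp
    have hx := pv_oxTail_eq b c t
    rw [List.map_cons, List.map_cons, List.dropLast_cons₂] at hx
    simp only [pvBt] at hj hx
    simp [hx, pvBt, PySem.Chars.join_cons_cons, List.getLastD_eq_getLast?,
      List.getLast?_eq_some_getLast]

theorem pv_slice_fmt (xs : List String) (h : xs ≠ []) :
    format_slice_summary xs = format_backticked_list xs := by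
  unfold format_slice_summary format_backticked_list
  cases xs with
  | nil => exact absurd rfl h
  | cons a t =>
    cases t with
    | nil => simp [PySem.List.pyGetD, PySem.List.pyGet?, PySem.List.pyIdx?]
    | cons b u => simp

-- the three guarded line-builders of B rewritten into A's formatters
theorem pv_ox_approved (s : PySem.Set String) :
    (if PySem.Set.equal s pvPG then ["- Approved planning gates."]
     else if !s.isEmpty then
       ["- Approved planning gates: " ++ oxford (PySem.List.sorted s (fun x => x) false) ++ "."]
     else [])
    = (if PySem.Set.equal s pvPG then ["- Approved planning gates."]
       else if !s.isEmpty then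
         ["- Approved planning gates: " ++
           format_backticked_list (PySem.List.sorted s (fun x => x) false) ++ "."]
       else []) := by
  by_cases h1 : PySem.Set.equal s pvPG = true
  · simp [h1]
  · by_cases h2 : s.isEmpty = true
    · simp [h1, h2]
    · have hne : PySem.List.sorted s (fun x => x) false ≠ [] := by
        rw [Ne, PySem.List.sorted_eq_nil_iff]
        intro hc
        rw [hc] at h2
        simp at h2
      simp [h1, h2, pv_oxford_eq _ hne]

theorem pv_ox_slices (s : PySem.Set String) :
    (if !s.isEmpty then
       ["- Completed slices " ++ oxford (PySem.List.sorted s (fun x => x) false) ++ "."]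
     else [])
    = (if !(PySem.List.sorted s (fun x => x) false).isEmpty then
         ["- Completed slices " ++ format_slice_summary (PySem.List.sorted s (fun x => x) false) ++ "."]
       else []) := by
  rw [pv_sorted_isEmpty]
  by_cases h : s.isEmpty = true
  · simp [h]
  · have hne : PySem.List.sorted s (fun x => x) false ≠ [] := by
      rw [Ne, PySem.List.sorted_eq_nil_iff]
      intro hc
      rw [hc] at h
      simp at h
    simp [h, pv_oxford_eq _ hne, pv_slice_fmt _ hne]

theorem pv_ox_line (l : List String) (pre : String) :
    (if !l.isEmpty then [pre ++ oxford l ++ "."] else [])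
    = (if !l.isEmpty then [pre ++ format_backticked_list l ++ "."] else []) := by
  by_cases h : l.isEmpty = true
  · simp [h]
  · simp [h, pv_oxford_eq l (by simpa using h)]

theorem pv_any_of_getLast?_none (l : List (List (String × String))) (p : List (String × String) → Bool)
    (h : (l.filter p).getLast? = none) : l.any p = false := by
  rw [List.any_eq_false]
  intro x hx hpx
  have hnil := List.getLast?_eq_none_iff.mp h
  have : x ∈ l.filter p := List.mem_filter.mpr ⟨hx, hpx⟩
  rw [hnil] at this
  cases this

theorem pv_any_of_getLast?_some (l : List (List (String × String))) (p : List (String × String) → Bool)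
    (ev : List (String × String)) (h : (l.filter p).getLast? = some ev) : l.any p = true := by
  have hmem : ev ∈ l.filter p := List.mem_of_getLast? h
  rcases List.mem_filter.mp hmem with ⟨he, hpe⟩
  exact List.any_eq_true.mpr ⟨_, he, hpe⟩

theorem pv_path_line (l : List (List (String × String))) (p : List (String × String) → Bool)
    (pre post : String) :
    (if l.any p then
       [pre ++ pvStrOpt (match (l.filter p).getLast? with
         | none => none
         | some e => pvGet e "canonical_path") ++ post]
     else [])
    = (match (l.filter p).getLast? with
       | some ev => [pre ++ pvStrOpt (pvGet ev "canonical_path") ++ post]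
       | none => []) := by
  cases h : (l.filter p).getLast? with
  | none => simp [pv_any_of_getLast?_none _ _ h]
  | some ev => simp [pv_any_of_getLast?_some _ _ _ h]

-- filterMap id over optional candidates = concatenation of the if-lists
theorem pv_fm_cons (o : Option String) (l : List (Option String)) :
    List.filterMap id (o :: l) = o.toList ++ List.filterMap id l := by
  cases o <;> simp

theorem pv_toList_ite (c : Prop) [Decidable c] (x : String) (o : Option String) :
    (if c then some x else o).toList = if c then [x] else o.toList := by
  split <;> rfl

theorem pv_last_prom (l : List (List (String × String))) :
    l.foldl (fun acc e => if pProm e then pvGet e "canonical_path" else acc) (none : Option String) =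
      (match (l.filter pProm).getLast? with | none => none | some e => pvGet e "canonical_path") :=
  pv_foldl_last _ _ _ _

theorem pv_last_arch (l : List (List (String × String))) :
    l.foldl (fun acc e => if pArch e then pvGet e "canonical_path" else acc) (none : Option String) =
      (match (l.filter pArch).getLast? with | none => none | some e => pvGet e "canonical_path") :=
  pv_foldl_last _ _ _ _

-- ===== VERDICT (by name: the statement is the Claim_ definition above) =====
theorem render_compact_event_summary_spec : Claim_equal_render_compact_event_summary := by
  intro events _
  unfold Spec_render_compact_event_summary render_compact_event_summary render_compact_event_summary_alt
  cases events with
  | nil => rfl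
  | cons e0 es =>
  rw [if_neg (by simp)]
  rw [show PySem.Set.ofList ["feature_contract", "architecture", "tech_design", "slicing_readiness"] = pvPG from rfl]
  rw [show ["implementation", "review", "verification", "finish"] = pvDG from rfl]
  dsimp only
  rw [pv_loop_spec]
  simp only [Bool.false_or]
  rw [pv_last_prom, pv_last_arch]
  rw [show (fun e : List (String × String) => pvGet e "event_type" == some "run_initialized") = pInit from rfl]
  rw [show (fun e : List (String × String) => pvGet e "event_type" == some "review_completed") = pRev from rfl]
  rw [show (fun e : List (String × String) => pvGet e "event_type" == some "verification_completed") = pVer from rfl]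
  rw [show (fun e : List (String × String) => pvGet e "event_type" == some "feature_promoted") = pProm from rfl]
  rw [show (fun e : List (String × String) => pvGet e "event_type" == some "incoming_variant_archived") = pArch from rfl]
  rw [show (fun e : List (String × String) =>
      pvGet e "event_type" == some "gate_status_changed" &&
      (pvGet e "new_status" == some "approved" || pvGet e "new_status" == some "delegated") &&
      PySem.Set.contains pvPG (pvStrOpt (pvGet e "gate"))) = pApp from rfl]
  rw [show (fun e : List (String × String) =>
      (pvGet e "event_type" == some "slice_completed" ||
       pvGet e "event_type" == some "slice_retry_completed") &&
      pvTruthy (pvGet e "slice")) = pSlc from rfl]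
  rw [show (fun e : List (String × String) => pvStrOpt (pvGet e "gate")) = fGate from rfl]
  rw [show (fun e : List (String × String) => pvStrOpt (pvGet e "slice")) = fSlc from rfl]
  simp only [pv_update_empty, pv_fm_cons, List.filterMap_nil, pv_toList_ite,
    Option.toList_none, Option.toList_some]
  have hfc : pvDG.filter (fun g => PySem.Set.contains (PySem.Set.ofList ((e0 :: es).filterMap fDel)) g) =
      pvDG.filter (fun gate => (e0 :: es).any (fun e =>
        pvGet e "event_type" == some "gate_status_changed" &&
        pvGet e "gate" == some gate &&
        pvGet e "new_status" == some "complete")) :=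
    List.filter_congr (fun g hgm => pv_deliv_mem (e0 :: es) g hgm)
  rw [hfc]
  rw [pv_ox_approved, pv_ox_slices, pv_ox_line, pv_path_line, pv_path_line]
  simp [List.append_assoc]
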